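-- pv_equiv track=rewrite | github.com/kishalayb18/Python-Programming | practice/T_Exam2.py | Alice_str
-- ===== SOURCE A (Python) =====
-- def Alice_str(s):
--     cnt1=0
--     cnt2=0
--     flag=0
--     temp=''
--     for i in s:
--         cnt1=0
--         for j in range(len(i)):
--             temp=i[j]+temp
--         for k in range(len(i)):
--             if i[k]!=temp[k]:
--                 cnt1=cnt1+1
--         if cnt1<=2:
--             cnt2=cnt2+1
--     return cnt2
-- ===== SOURCE B (Python) =====
-- def Alice_str(s):
--     cnt2 = 0
--     for i in s:
--         pairs = sum(1 for k in range(len(i) // 2) if i[k] != i[-1 - k])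
--         if pairs <= 1:
--             cnt2 += 1
--     return cnt2
-- ===== Notes on version B (the rewrite author's own statement) =====
-- stated objective: faster
-- what changed: B drops A's cross-string accumulated 'temp' string (only its first len(i) chars, i.e. reversed(i), are ever compared) and counts mismatched mirror pairs in the first half of each string with threshold 1, instead of rebuilding temp and counting full-range mismatches with threshold 2.
import Mathlib
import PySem

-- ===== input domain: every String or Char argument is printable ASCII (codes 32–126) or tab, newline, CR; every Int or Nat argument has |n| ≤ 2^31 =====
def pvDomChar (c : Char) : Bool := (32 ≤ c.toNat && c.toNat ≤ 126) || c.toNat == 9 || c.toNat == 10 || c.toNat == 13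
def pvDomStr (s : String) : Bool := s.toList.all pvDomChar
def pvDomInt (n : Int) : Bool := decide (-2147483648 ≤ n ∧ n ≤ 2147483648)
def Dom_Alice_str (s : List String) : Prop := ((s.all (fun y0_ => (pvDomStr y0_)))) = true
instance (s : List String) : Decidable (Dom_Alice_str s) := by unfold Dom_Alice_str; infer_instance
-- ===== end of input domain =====

-- B drops the dead cross-string temp accumulation and counts mismatched mirror pairs in each
-- string's first half (timing run measured B faster; A's temp grows across strings).


-- ===== PORT A =====
-- Line-by-line transliteration of A: state (cnt2, temp); per string i, temp is grown
-- by prepending each char of i, then cnt1 counts k with i[k] != temp[k] (indices always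
-- in range in A, so getD is exact), and cnt2 increments when cnt1 <= 2.
def Alice_str (s : List String) : Int :=
  (s.foldl (fun (st : Int × List Char) (i : String) =>
      let ci := i.toList
      let temp1 := (List.range ci.length).foldl (fun t j => ci.getD j 'a' :: t) st.2
      let cnt1 := (List.range ci.length).foldl
        (fun c k => if ci.getD k 'a' ≠ temp1.getD k 'a' then c + 1 else c) (0 : Int)
      (if cnt1 ≤ 2 then st.1 + 1 else st.1, temp1))
    ((0 : Int), ([] : List Char))).1

-- ===== PORT B =====
-- Transliteration of Source B; Python's i[-1-k] for 0 ≤ k < len//2 is exactly index n-1-k.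
def Alice_str_alt (s : List String) : Int :=
  s.foldl (fun cnt2 i =>
      let ci := i.toList
      let n := ci.length
      let pairs := (List.range (n / 2)).foldl
        (fun p k => if ci.getD k 'a' ≠ ci.getD (n - 1 - k) 'a' then p + 1 else p) (0 : Int)
      if pairs ≤ 1 then cnt2 + 1 else cnt2) (0 : Int)

-- ===== PRECONDITION & SPEC =====
def Spec_Alice_str (s : List String) (out : Int) : Prop := out = Alice_str_alt s
instance (s : List String) (out : Int) : Decidable (Spec_Alice_str s out) := by unfold Spec_Alice_str; infer_instance

-- ===== CLAIM (what is proved, stated in full; the proofs are below) =====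
def Claim_equal_Alice_str : Prop := ∀ (s : List String), Dom_Alice_str s → Spec_Alice_str s (Alice_str s)

-- ===== LEMMAS AND PROOFS =====

-- building the temp string: the loop prepends the chars of ci, yielding reverse ci ++ t
theorem pv_build_eq (ci t : List Char) :
    (List.range ci.length).foldl (fun t j => ci.getD j 'a' :: t) t = ci.reverse ++ t := by
  induction ci generalizing t with
  | nil => simp
  | cons c cs ih =>
      simp only [List.length_cons, List.range_succ_eq_map, List.foldl_cons, List.foldl_map,
        List.getD_cons_zero, List.getD_cons_succ]
      rw [ih (c :: t)]
      simp

-- conditional counting over range = sum of indicators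
theorem pv_count_eq_sum (P : ℕ → Prop) [DecidablePred P] (n : ℕ) (c : Int) :
    (List.range n).foldl (fun c k => if P k then c + 1 else c) c
      = c + ∑ k ∈ Finset.range n, (if P k then (1 : Int) else 0) := by
  induction n generalizing c with
  | zero => simp
  | succ m ih =>
      rw [List.range_succ, List.foldl_append, ih, Finset.sum_range_succ]
      by_cases h : P m <;> simp [h] <;> try ring

theorem pv_getD_rev_append (ci t : List Char) (k : ℕ) (hk : k < ci.length) :
    (ci.reverse ++ t).getD k 'a' = ci.getD (ci.length - 1 - k) 'a' := by
  have h1 : k < ci.reverse.length := by simpa using hk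
  have h2 : ci.length - 1 - k < ci.length := by omega
  rw [List.getD_eq_getElem _ _ (by simp [List.length_append]; omega),
      List.getD_eq_getElem _ _ h2]
  rw [List.getElem_append_left h1, List.getElem_reverse]

-- reflection: a symmetric indicator sum over range n is twice its first-half sum
theorem pv_sum_reflect (n : ℕ) (f : ℕ → Int)
    (hsym : ∀ k, k < n → f (n - 1 - k) = f k)
    (hmid : n % 2 = 1 → f (n / 2) = 0) :
    (∑ k ∈ Finset.range n, f k) = 2 * ∑ k ∈ Finset.range (n / 2), f k := by
  set m := n / 2 with hm
  have hmn : m ≤ n := Nat.div_le_self _ _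
  have hsplit : (∑ k ∈ Finset.range n, f k)
      = (∑ k ∈ Finset.range m, f k) + ∑ k ∈ Finset.Ico m n, f k := by
    rw [Finset.range_eq_Ico, ← Finset.sum_Ico_consecutive _ (Nat.zero_le m) hmn,
        ← Finset.range_eq_Ico]
  have hIco : (∑ k ∈ Finset.Ico m n, f k) = ∑ i ∈ Finset.range (n - m), f (m + i) := by
    rw [Finset.sum_Ico_eq_sum_range]
  have hrefl : (∑ i ∈ Finset.range (n - m), f (m + i))
      = ∑ i ∈ Finset.range (n - m), f i := by
    rw [← Finset.sum_range_reflect (fun i => f (m + i)) (n - m)]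
    apply Finset.sum_congr rfl
    intro i hi
    rw [Finset.mem_range] at hi
    have h1 : m + (n - m - 1 - i) = n - 1 - i := by omega
    rw [h1, hsym i (by omega)]
  rcases Nat.even_or_odd n with he | ho
  · have he2 : n % 2 = 0 := Nat.even_iff.mp he
    have : n - m = m := by omega
    rw [hsplit, hIco, hrefl, this]; ring
  · have hodd : n % 2 = 1 := Nat.odd_iff.mp ho
    have hr : n - m = m + 1 := by omega
    rw [hsplit, hIco, hrefl, hr, Finset.sum_range_succ, hmid hodd]
    ring

-- per-string: A's cnt1 equals twice B's pair count
theorem pv_cnt1_eq (ci t : List Char) :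
    (List.range ci.length).foldl
        (fun c k => if ci.getD k 'a' ≠ (ci.reverse ++ t).getD k 'a' then c + 1 else c) (0 : Int)
      = 2 * (List.range (ci.length / 2)).foldl
        (fun p k => if ci.getD k 'a' ≠ ci.getD (ci.length - 1 - k) 'a' then p + 1 else p) (0 : Int) := by
  set n := ci.length with hn
  set f : ℕ → Int := fun k => if ci.getD k 'a' ≠ ci.getD (n - 1 - k) 'a' then 1 else 0 with hf
  rw [pv_count_eq_sum, pv_count_eq_sum]
  have hA : (∑ k ∈ Finset.range n,
      (if ci.getD k 'a' ≠ (ci.reverse ++ t).getD k 'a' then (1 : Int) else 0))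
      = ∑ k ∈ Finset.range n, f k := by
    apply Finset.sum_congr rfl
    intro k hk
    rw [Finset.mem_range] at hk
    rw [pv_getD_rev_append ci t k hk]
  rw [hA]
  rw [zero_add, zero_add, pv_sum_reflect n f]
  · intro k hk
    have h1 : n - 1 - (n - 1 - k) = k := by omega
    simp only [hf, h1]
    by_cases h : ci.getD k 'a' = ci.getD (n - 1 - k) 'a'
    · rw [if_neg (fun hc => hc h.symm), if_neg (fun hc => hc h)]
    · rw [if_pos (fun hc => h hc.symm), if_pos h]
  · intro hodd
    simp only [hf]
    have : n - 1 - n / 2 = n / 2 := by omega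
    simp [this]

-- outer loop: A's fold (for any carried temp) computes B's fold
theorem pv_fold_eq (s : List String) (c : Int) (t : List Char) :
    (s.foldl (fun (st : Int × List Char) (i : String) =>
      let ci := i.toList
      let temp1 := (List.range ci.length).foldl (fun t j => ci.getD j 'a' :: t) st.2
      let cnt1 := (List.range ci.length).foldl
        (fun c k => if ci.getD k 'a' ≠ temp1.getD k 'a' then c + 1 else c) (0 : Int)
      (if cnt1 ≤ 2 then st.1 + 1 else st.1, temp1)) (c, t)).1
    = s.foldl (fun cnt2 i =>
      let ci := i.toList
      let n := ci.length
      let pairs := (List.range (n / 2)).foldl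
        (fun p k => if ci.getD k 'a' ≠ ci.getD (n - 1 - k) 'a' then p + 1 else p) (0 : Int)
      if pairs ≤ 1 then cnt2 + 1 else cnt2) c := by
  induction s generalizing c t with
  | nil => rfl
  | cons i rest ih =>
      simp only [List.foldl_cons]
      rw [pv_build_eq]
      rw [pv_cnt1_eq i.toList t]
      set pairs := (List.range (i.toList.length / 2)).foldl
        (fun p k => if i.toList.getD k 'a' ≠ i.toList.getD (i.toList.length - 1 - k) 'a'
          then p + 1 else p) (0 : Int) with hp
      have hcond : (if 2 * pairs ≤ 2 then c + 1 else c) = (if pairs ≤ 1 then c + 1 else c) := by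
        split_ifs <;> omega
      rw [hcond, ih]

-- ===== VERDICT (by name: the statement is the Claim_ definition above) =====
theorem Alice_str_spec : Claim_equal_Alice_str := by
  intro s _
  unfold Spec_Alice_str Alice_str Alice_str_alt
  exact pv_fold_eq s 0 []
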